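-- pv_equiv track=rewrite | github.com/lianghong/chinese-poetry | compose.py | addPunctuation
-- ===== SOURCE A (Python) =====
-- commaChar = "，"
--
-- fullStopChar = "。"
--
-- def addPunctuation(text):
--     lines = text.strip().split(" ")
--     index = 0
--     retList = []
--     for line in lines:
--         retList.append(line)
--         if index % 2 == 0:
--             retList.append(commaChar)
--         else:
--             retList.append(fullStopChar)
--         index += 1
--     return "".join(retList)
-- ===== SOURCE B (Python) =====
-- commaChar = "，"
--
-- fullStopChar = "。"
--
-- def addPunctuation(text):
--     # Same tokenisation as A; then consume the lines two at a time (couplet-wise),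
--     # emitting one already-punctuated couplet string per step, instead of A's
--     # per-line loop with an index-parity branch.
--     lines = text.strip().split(" ")
--     pieces = []
--     i = 0
--     n = len(lines)
--     while i + 1 < n:
--         pieces.append(lines[i] + commaChar + lines[i + 1] + fullStopChar)
--         i += 2
--     if i < n:
--         pieces.append(lines[i] + commaChar)
--     return "".join(pieces)
-- ===== Notes on version B (the rewrite author's own statement) =====
-- stated objective: alternative
-- what changed: Replaces A's per-line loop with an index counter and a parity branch by a couplet-wise traversal that consumes two lines per step, emitting one fully punctuated couplet string (line+comma+line+period), with a single trailing comma-only piece for an odd last line.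
import Mathlib
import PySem

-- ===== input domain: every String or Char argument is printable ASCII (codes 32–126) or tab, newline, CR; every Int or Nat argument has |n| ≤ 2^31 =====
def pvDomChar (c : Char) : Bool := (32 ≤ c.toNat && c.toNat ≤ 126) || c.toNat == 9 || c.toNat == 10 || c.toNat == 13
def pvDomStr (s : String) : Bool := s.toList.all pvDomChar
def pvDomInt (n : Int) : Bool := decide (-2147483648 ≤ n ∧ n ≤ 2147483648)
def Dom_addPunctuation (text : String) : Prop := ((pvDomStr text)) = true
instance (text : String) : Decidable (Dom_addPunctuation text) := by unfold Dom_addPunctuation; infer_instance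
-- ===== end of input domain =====

-- B consumes the split lines two at a time (one punctuated couplet per step) instead of
-- A's per-line loop with an index-parity branch; objective: alternative decomposition, same cost.

-- ===== PORT A =====
-- per-line loop: state is (index, retList); append the line, then comma on even index, period on odd
def addPunStepA (st : Int × List String) (line : String) : Int × List String :=
  let retList := st.2 ++ [line]
  let retList := if PySem.Int.mod st.1 2 == 0 then retList ++ ["，"] else retList ++ ["。"]
  (st.1 + 1, retList)

def addPunctuation (text : String) : String :=
  let lines := (PySem.Str.split? (PySem.Str.strip text) " ").getD []  -- sep " " ≠ "": split? is never none
  let st := lines.foldl addPunStepA ((0 : Int), ([] : List String))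
  PySem.Str.join "" st.2

-- ===== PORT B =====
-- couplet-wise consumption of the line list (Source B's while loop taking two lines per step)
def coupletGo : List String → List String
  | [] => []
  | [x] => [x ++ "，"]
  | x :: y :: rest => (x ++ "，" ++ y ++ "。") :: coupletGo rest

def addPunctuation_alt (text : String) : String :=
  PySem.Str.join "" (coupletGo ((PySem.Str.split? (PySem.Str.strip text) " ").getD []))

-- ===== PRECONDITION & SPEC =====
def Spec_addPunctuation (text : String) (out : String) : Prop := out = addPunctuation_alt text
instance (text : String) (out : String) : Decidable (Spec_addPunctuation text out) := by unfold Spec_addPunctuation; infer_instance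

-- ===== CLAIM (what is proved, stated in full; the proofs are below) =====
def Claim_equal_addPunctuation : Prop := ∀ (text : String), Dom_addPunctuation text → Spec_addPunctuation text (addPunctuation text)

-- ===== LEMMAS AND PROOFS =====

theorem flatten_intersperse_nil {α : Type} (L : List (List α)) :
    (List.intersperse ([] : List α) L).flatten = L.flatten := by
  induction L with
  | nil => simp
  | cons a L ih => cases L <;> simp_all [List.intersperse]

-- empty-separator join is concatenation of the pieces
theorem join_empty_eq_flatten (l : List String) :
    (PySem.Str.join "" l).toList = (l.map String.toList).flatten := by
  rw [PySem.Str.toList_join]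
  simp [PySem.Chars.join, List.intercalate, flatten_intersperse_nil]

theorem mod_two_succ (i : Int) (h : PySem.Int.mod i 2 = 0) : PySem.Int.mod (i + 1) 2 ≠ 0 := by
  simp only [PySem.Int.mod_eq_emod_of_pos (by norm_num : (0:Int) < 2)] at h ⊢
  omega

theorem mod_two_succ_succ (i : Int) (h : PySem.Int.mod i 2 = 0) : PySem.Int.mod (i + 2) 2 = 0 := by
  simp only [PySem.Int.mod_eq_emod_of_pos (by norm_num : (0:Int) < 2)] at h ⊢
  omega

-- loop invariant: from an even index, A's remaining loop contributes exactly B's couplets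
theorem foldl_addPunStepA_eq (lines : List String) :
    ∀ (i : Int) (acc : List String), PySem.Int.mod i 2 = 0 →
    (((lines.foldl addPunStepA (i, acc)).2).map String.toList).flatten =
      (acc.map String.toList).flatten ++ (((coupletGo lines).map String.toList)).flatten := by
  induction lines using coupletGo.induct with
  | case1 =>
      intro i acc _
      simp [coupletGo]
  | case2 x =>
      intro i acc h
      simp only [List.foldl, addPunStepA, h, coupletGo]
      simp [String.toList_append]
  | case3 x y rest ih =>
      intro i acc h
      have h1 := mod_two_succ i h
      simp only [List.foldl, addPunStepA, h]
      have hb : (PySem.Int.mod (i + 1) 2 == 0) = false := by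
        simp only [beq_eq_false_iff_ne, ne_eq]
        exact h1
      simp only [hb, beq_self_eq_true, if_true, Bool.false_eq_true, if_false]
      rw [show i + 1 + 1 = i + 2 by ring, ih (i + 2) _ (mod_two_succ_succ i h)]
      simp [coupletGo, String.toList_append]

-- ===== VERDICT (by name: the statement is the Claim_ definition above) =====
theorem addPunctuation_spec : Claim_equal_addPunctuation := by
  intro text _
  unfold Spec_addPunctuation addPunctuation addPunctuation_alt
  apply String.toList_injective
  rw [join_empty_eq_flatten, join_empty_eq_flatten,
    foldl_addPunStepA_eq _ 0 [] (by decide)]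
  simp
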